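-- pv_equiv track=rewrite | github.com/melaniesong/hcde530 | HCDE 530/HCDE 530 week 4/analyze_helpful_votes.py | competition_ranks
-- ===== SOURCE A (Python) =====
-- def competition_ranks(reviews):
--     """Sort by helpful_votes descending; ties share the same rank (1,2,2,4 style)."""
--     sorted_rows = sorted(
--         reviews,
--         key=lambda r: (-int(r.get("helpful_votes") or 0), r.get("id", 0)),
--     )
--     ranked = []
--     for i, row in enumerate(sorted_rows):
--         if i == 0:
--             rank = 1
--         else:
--             prev = sorted_rows[i - 1]
--             cur_v = int(row.get("helpful_votes") or 0)
--             prev_v = int(prev.get("helpful_votes") or 0)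
--             if cur_v == prev_v:
--                 rank = ranked[-1][1]
--             else:
--                 rank = i + 1
--         ranked.append((row, rank))
--     return ranked
-- ===== SOURCE B (Python) =====
-- def competition_ranks(reviews):
--     """Sort by helpful_votes descending; ties share the same rank (1,2,2,4 style)."""
--     def v(r):
--         return int(r.get("helpful_votes") or 0)
--     sorted_rows = sorted(reviews, key=lambda r: (-v(r), r.get("id", 0)))
--     vals = [v(r) for r in sorted_rows]
--     return [(row, 1 + sum(1 for x in vals if x > v(row))) for row in sorted_rows]
-- ===== Notes on version B (the rewrite author's own statement) =====
-- stated objective: simpler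
-- what changed: The sequential tie-carry ranking loop (index arithmetic, previous-row lookup, ranked[-1] backreference) is replaced by a direct closed-form rank: 1 + the number of rows with strictly more helpful votes; the sort and its key are unchanged.
import Mathlib
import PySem

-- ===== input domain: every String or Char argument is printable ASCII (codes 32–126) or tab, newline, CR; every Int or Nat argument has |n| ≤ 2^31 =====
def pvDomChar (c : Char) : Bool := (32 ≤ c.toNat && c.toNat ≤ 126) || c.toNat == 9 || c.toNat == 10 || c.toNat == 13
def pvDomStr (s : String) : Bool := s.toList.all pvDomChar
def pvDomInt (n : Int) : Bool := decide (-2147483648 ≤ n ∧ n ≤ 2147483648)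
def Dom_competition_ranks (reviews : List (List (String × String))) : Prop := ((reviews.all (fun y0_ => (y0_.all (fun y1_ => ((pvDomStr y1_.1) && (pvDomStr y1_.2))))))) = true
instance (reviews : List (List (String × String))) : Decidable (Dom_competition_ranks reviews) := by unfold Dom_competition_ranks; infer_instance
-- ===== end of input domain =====

-- B replaces A's sequential tie-carry ranking loop by the closed-form competition rank
-- 1 + (number of rows with strictly more helpful votes); the sort and its key are unchanged (objective: simpler).

-- shared helpers: r.get(k) on the row dict, and the coercion int(r.get("helpful_votes") or 0)
def pvGetKey (r : List (String × String)) (k : String) : Option String :=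
  PySem.Dict.get? ⟨r⟩ k

def pvHvOpt (r : List (String × String)) : Option Int :=
  match pvGetKey r "helpful_votes" with
  | none => some 0
  | some s => if s = "" then some 0 else PySem.Int.ofStr? s

def pvHv (r : List (String × String)) : Int := (pvHvOpt r).getD 0

-- sorted(reviews, key=lambda r: (-int(r.get("helpful_votes") or 0), r.get("id", 0))) — identical line in A and B.
-- The missing-id default 0 is ported as "": under Pre_ the default is only ever compared with
-- another missing-id default (equal either way), so the sort output is Python's.
def pvSortRows (reviews : List (List (String × String))) : List (List (String × String)) :=
  PySem.List.sorted2 reviews (fun r => -(pvHv r)) (fun r => (pvGetKey r "id").getD "")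

-- ===== PORT A =====
def competition_ranks (reviews : List (List (String × String))) : List ((List (String × String)) × Int) :=
  let sorted_rows := pvSortRows reviews
  (PySem.List.enumerate sorted_rows).foldl (fun ranked p =>
    let i := p.1
    let row := p.2
    let rank : Int :=
      if i = 0 then 1
      else
        let prev := (PySem.List.pyGet? sorted_rows (i - 1)).getD []   -- always in range here
        let cur_v := pvHv row
        let prev_v := pvHv prev
        if cur_v = prev_v then ((PySem.List.pyGet? ranked (-1)).getD ([], 0)).2   -- ranked[-1][1]; ranked nonempty here
        else i + 1
    ranked ++ [(row, rank)]) []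

-- ===== PORT B =====
def competition_ranks_alt (reviews : List (List (String × String))) : List ((List (String × String)) × Int) :=
  let sorted_rows := pvSortRows reviews
  let vals := sorted_rows.map pvHv
  sorted_rows.map (fun row => (row, 1 + ((vals.countP (fun x => decide (pvHv row < x)) : Nat) : Int)))

-- ===== PRECONDITION & SPEC =====
-- Pre_ excludes exactly the inputs on which A raises: a ValueError from int() on a non-empty,
-- non-integer helpful_votes string, and a TypeError from the sort comparing a string "id" with the
-- int default 0 when two rows tied on votes differ in the presence of "id".
def Pre_competition_ranks (reviews : List (List (String × String))) : Prop :=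
  (∀ r ∈ reviews, pvHvOpt r ≠ none) ∧
  (∀ r ∈ reviews, ∀ s ∈ reviews, pvHv r = pvHv s →
      ((pvGetKey r "id").isSome = (pvGetKey s "id").isSome))
instance (reviews : List (List (String × String))) : Decidable (Pre_competition_ranks reviews) := by
  unfold Pre_competition_ranks; infer_instance

def pvWitness_competition_ranks : (List (List (String × String))) :=
  [[("helpful_votes", "2")], [("id", "a")], [("helpful_votes", "5"), ("id", "b")]]

def Spec_competition_ranks (reviews : List (List (String × String))) (out : List ((List (String × String)) × Int)) : Prop := out = competition_ranks_alt reviews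
instance (reviews : List (List (String × String))) (out : List ((List (String × String)) × Int)) : Decidable (Spec_competition_ranks reviews out) := by unfold Spec_competition_ranks; infer_instance

-- ===== CLAIM (what is proved, stated in full; the proofs are below) =====
def Claim_equal_competition_ranks : Prop := ∀ (reviews : List (List (String × String))), Dom_competition_ranks reviews → Pre_competition_ranks reviews → Spec_competition_ranks reviews (competition_ranks reviews)

-- ===== LEMMAS AND PROOFS =====

-- B's rank of a row against the sorted list l
def pvRank (l : List (List (String × String))) (row : List (String × String)) : Int :=
  1 + (((l.map pvHv).countP (fun x => decide (pvHv row < x)) : Nat) : Int)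

def pvG (l : List (List (String × String))) (row : List (String × String)) :
    (List (String × String)) × Int :=
  (row, pvRank l row)

-- A's loop body, with the sorted list l as an explicit parameter
def pvStep (l : List (List (String × String)))
    (ranked : List ((List (String × String)) × Int)) (p : Int × (List (String × String))) :
    List ((List (String × String)) × Int) :=
  let i := p.1
  let row := p.2
  let rank : Int :=
    if i = 0 then 1
    else
      let prev := (PySem.List.pyGet? l (i - 1)).getD []
      let cur_v := pvHv row
      let prev_v := pvHv prev
      if cur_v = prev_v then ((PySem.List.pyGet? ranked (-1)).getD ([], 0)).2
      else i + 1
  ranked ++ [(row, rank)]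

lemma competition_ranks_eq_foldl (reviews : List (List (String × String))) :
    competition_ranks reviews =
      (PySem.List.enumerate (pvSortRows reviews)).foldl (pvStep (pvSortRows reviews)) [] := rfl

-- the comparator sorted2 uses on our key pair
def pvBefore (a b : List (String × String)) : Bool :=
  decide (-(pvHv a) < -(pvHv b)) ||
    (!decide (-(pvHv b) < -(pvHv a)) && decide ((pvGetKey a "id").getD "" < (pvGetKey b "id").getD ""))

lemma pvSortRows_eq_foldl (reviews : List (List (String × String))) :
    pvSortRows reviews = reviews.foldl (fun acc x => PySem.List.insertBy pvBefore x acc) [] := rfl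

lemma pvBefore_true {a b : List (String × String)} (h : pvBefore a b = true) : pvHv b ≤ pvHv a := by
  unfold pvBefore at h
  rcases Bool.or_eq_true_iff.mp h with h1 | h2
  · have := of_decide_eq_true h1; omega
  · have := of_decide_eq_false (Bool.not_eq_true' .. ▸ (Bool.and_eq_true_iff.mp h2).1)
    omega

lemma pvBefore_false {a b : List (String × String)} (h : pvBefore a b = false) : pvHv a ≤ pvHv b := by
  unfold pvBefore at h
  have h1 := (Bool.or_eq_false_iff.mp h).1
  have := of_decide_eq_false h1; omega

lemma insertBy_pairwise_pvHv (x : List (String × String)) (ys : List (List (String × String)))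
    (h : ys.Pairwise (fun a b => pvHv b ≤ pvHv a)) :
    (PySem.List.insertBy pvBefore x ys).Pairwise (fun a b => pvHv b ≤ pvHv a) := by
  induction ys with
  | nil => simp [PySem.List.insertBy]
  | cons y ys ih =>
    rw [PySem.List.insertBy]
    rcases List.pairwise_cons.mp h with ⟨hy, hys⟩
    by_cases hb : pvBefore x y = true
    · rw [if_pos hb]
      refine List.pairwise_cons.mpr ⟨?_, h⟩
      intro z hz
      rcases List.mem_cons.mp hz with rfl | hz
      · exact pvBefore_true hb
      · exact le_trans (hy z hz) (pvBefore_true hb)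
    · rw [if_neg hb]
      refine List.pairwise_cons.mpr ⟨?_, ih hys⟩
      intro z hz
      rcases (PySem.List.mem_insertBy ..).mp hz with rfl | hz
      · exact pvBefore_false (Bool.eq_false_iff.mpr hb)
      · exact hy z hz

lemma foldl_insertBy_pairwise_pvHv (xs acc : List (List (String × String)))
    (h : acc.Pairwise (fun a b => pvHv b ≤ pvHv a)) :
    (xs.foldl (fun acc x => PySem.List.insertBy pvBefore x acc) acc).Pairwise
      (fun a b => pvHv b ≤ pvHv a) := by
  induction xs generalizing acc with
  | nil => simpa using h
  | cons x xs ih => exact ih _ (insertBy_pairwise_pvHv x acc h)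

lemma pvSortRows_pairwise (reviews : List (List (String × String))) :
    (pvSortRows reviews).Pairwise (fun a b => pvHv b ≤ pvHv a) := by
  rw [pvSortRows_eq_foldl]
  exact foldl_insertBy_pairwise_pvHv reviews [] (by simp)

-- main loop invariant: folding A's step over the enumerated suffix completes B's map
lemma pvMain (l : List (List (String × String)))
    (hp : l.Pairwise (fun a b => pvHv b ≤ pvHv a)) :
    ∀ (t : List (List (String × String))) (k : Nat), l.drop k = t →
      (PySem.List.enumerate t (k : Int)).foldl (pvStep l) ((l.take k).map (pvG l)) =
        l.map (pvG l) := by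
  intro t
  induction t with
  | nil =>
    intro k hd
    have hk : l.length ≤ k := by
      by_contra hlt
      have := List.drop_eq_nil_iff.mp hd
      omega
    simp [PySem.List.enumerate_nil, List.take_of_length_le hk]
  | cons row t' ih =>
    intro k hd
    have hk : k < l.length := by
      by_contra hge
      rw [List.drop_eq_nil_iff.mpr (by omega)] at hd
      exact (List.cons_ne_nil _ _ hd.symm).elim
    have hrow : l[k]? = some row := by
      rw [← List.head?_drop, hd]; rfl
    have hrowE : l[k]'hk = row := by
      have := List.getElem?_eq_getElem (l := l) (i := k) hk
      rw [hrow] at this; exact (Option.some_inj.mp this.symm)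
    have htake : l.take (k + 1) = l.take k ++ [row] := by
      rw [List.take_add_one, hrow]; rfl
    have hdrop' : l.drop (k + 1) = t' := by
      have : l.drop (k + 1) = (l.drop k).tail := by
        rw [← List.drop_drop]; simp
      rw [this, hd]; rfl
    rw [PySem.List.enumerate_cons, List.foldl_cons]
    have hstep : pvStep l ((l.take k).map (pvG l)) ((k : Int), row) =
        (l.take (k + 1)).map (pvG l) := by
      rw [htake, List.map_append]
      unfold pvStep
      simp only []
      congr 1
      show [(row, _)] = [pvG l row]
      unfold pvG
      congr 1
      congr 1
      -- goal: A's rank expression = pvRank l row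
      by_cases hk0 : k = 0
      · subst hk0
        rw [if_pos (by norm_num)]
        have hl : l = row :: t' := by simpa using hd
        unfold pvRank
        have : (l.map pvHv).countP (fun x => decide (pvHv row < x)) = 0 := by
          apply List.countP_eq_zero.mpr
          intro a ha
          rcases List.mem_map.mp ha with ⟨r, hr, rfl⟩
          rw [hl] at hr
          rcases List.mem_cons.mp hr with rfl | hr
          · simp
          · have : pvHv r ≤ pvHv row := by
              rw [hl] at hp
              exact (List.pairwise_cons.mp hp).1 r hr
            simp; omega
        rw [this]; norm_num
      · -- k ≥ 1
        have hk1 : 1 ≤ k := Nat.one_le_iff_ne_zero.mpr hk0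
        rw [if_neg (by exact_mod_cast hk0)]
        obtain ⟨m, rfl⟩ : ∃ m, k = m + 1 := ⟨k - 1, by omega⟩
        have hm : m < l.length := by omega
        have hprev? : l[m]? = some (l[m]'hm) := List.getElem?_eq_getElem hm
        set prev := l[m]'hm with hprevdef
        have hpg : PySem.List.pyGet? l ((m + 1 : Nat) - 1 : Int) = some prev := by
          have : ((m + 1 : Nat) : Int) - 1 = ((m : Nat) : Int) := by push_cast; ring
          rw [this, PySem.List.pyGet?_natCast, hprev?]
        rw [hpg]
        simp only [Option.getD_some]
        -- decompose l around positions m and m+1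
        have hdm : l.drop m = prev :: row :: t' := by
          have h1 : l.drop m = l[m]'hm :: l.drop (m + 1) := List.drop_eq_getElem_cons hm
          rw [h1, hd]
        have hsplit : l = l.take m ++ (prev :: row :: t') := by
          rw [← hdm, List.take_append_drop]
        have htm : l.take (m + 1) = l.take m ++ [prev] := by
          rw [List.take_add_one, hprev?]; rfl
        -- pairwise facts
        have hpw := hp
        rw [hsplit, List.pairwise_append] at hpw
        obtain ⟨hpw1, hpw2, hpw3⟩ := hpw
        rcases List.pairwise_cons.mp hpw2 with ⟨hprevle, hpw4⟩
        rcases List.pairwise_cons.mp hpw4 with ⟨hrowle, _⟩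
        have hrp : pvHv row ≤ pvHv prev := hprevle row (by simp)
        by_cases hEq : pvHv row = pvHv prev
        · rw [if_pos hEq]
          -- ranked[-1] = pvG l prev
          rw [htm, List.map_append]
          simp only [List.map_cons, List.map_nil]
          rw [PySem.List.pyGet?_neg_one_append_singleton]
          simp only [Option.getD_some]
          unfold pvRank
          have : (fun x => decide (pvHv prev < x)) = (fun x => decide (pvHv row < x)) := by
            funext x; rw [hEq]
          rw [this]
        · rw [if_neg hEq]
          have hlt : pvHv row < pvHv prev := lt_of_le_of_ne hrp hEq
          -- count of strictly-greater votes is exactly m + 1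
          unfold pvRank
          have hcount : (l.map pvHv).countP (fun x => decide (pvHv row < x)) = m + 1 := by
            rw [hsplit, List.map_append, List.countP_append]
            have hc1 : ((l.take m).map pvHv).countP (fun x => decide (pvHv row < x)) =
                ((l.take m).map pvHv).length := by
              apply List.countP_eq_length.mpr
              intro a ha
              rcases List.mem_map.mp ha with ⟨r, hr, rfl⟩
              have : pvHv prev ≤ pvHv r := hpw3 r hr prev (by simp)
              simp; omega
            have hlen : ((l.take m).map pvHv).length = m := by
              rw [List.length_map, List.length_take]; omega
            have hc2 : ((prev :: row :: t').map pvHv).countP (fun x => decide (pvHv row < x)) = 1 := by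
              simp only [List.map_cons, List.countP_cons]
              have h0 : ((t'.map pvHv).countP (fun x => decide (pvHv row < x))) = 0 := by
                apply List.countP_eq_zero.mpr
                intro a ha
                rcases List.mem_map.mp ha with ⟨r, hr, rfl⟩
                have : pvHv r ≤ pvHv row := hrowle r hr
                simp; omega
              rw [h0]
              simp [hlt]
            rw [hc1, hlen, hc2]
          rw [hcount]
          push_cast
          ring
    rw [hstep]
    have : ((k : Int) + 1) = ((k + 1 : Nat) : Int) := by push_cast; ring
    rw [this]
    exact ih (k + 1) hdrop'

-- ===== VERDICT (by name: the statement is the Claim_ definition above) =====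
theorem competition_ranks_spec : Claim_equal_competition_ranks := by
  intro reviews _ _
  show competition_ranks reviews = competition_ranks_alt reviews
  rw [competition_ranks_eq_foldl]
  have h := pvMain (pvSortRows reviews) (pvSortRows_pairwise reviews) (pvSortRows reviews) 0 rfl
  simpa using h
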